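-- pv_equiv track=rewrite | github.com/vorenusCoA/MIT-6.0001 | pset3/ps3.py | is_valid_word_helper
-- ===== SOURCE A (Python) =====
-- def get_frequency_dict(sequence):
--     """
--     Returns a dictionary where the keys are elements of the sequence
--     and the values are integer counts, for the number of times that
--     an element is repeated in the sequence.
--
--     sequence: string or list
--     return: dictionary
--     """
--     # freqs: dictionary (element_type -> int)
--     freq = {}
--     for x in sequence:
--         freq[x] = freq.get(x,0) + 1
--     return freq
--
-- def is_valid_word_helper(word_lower, hand, word_list):
--     # Check if the word is composed of letters in the hand
--     word_lower_dict = get_frequency_dict(word_lower)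
--     for key, value in word_lower_dict.items():
--         if (key not in hand or hand[key] < value):
--             return False
--
--     # Check if the word is in our list
--     found = False
--     for wordDB in word_list:
--         if wordDB == word_lower:
--             found = True
--             break
--
--     return found
-- ===== SOURCE B (Python) =====
-- def is_valid_word_helper(word_lower, hand, word_list):
--     # Single consuming pass over the word against a shrinking copy of the hand,
--     # then a direct membership test.
--     remaining = dict(hand)
--     for ch in word_lower:
--         if remaining.get(ch, 0) <= 0:
--             return False
--         remaining[ch] = remaining[ch] - 1
--     return word_lower in word_list
-- ===== Notes on version B (the rewrite author's own statement) =====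
-- stated objective: simpler
-- what changed: Replaces A's two-pass build-a-frequency-dict-then-compare-counts plus a hand-written search loop with a single consuming pass over the word that decrements a copy of the hand, and a direct `in` membership test.
import Mathlib
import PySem

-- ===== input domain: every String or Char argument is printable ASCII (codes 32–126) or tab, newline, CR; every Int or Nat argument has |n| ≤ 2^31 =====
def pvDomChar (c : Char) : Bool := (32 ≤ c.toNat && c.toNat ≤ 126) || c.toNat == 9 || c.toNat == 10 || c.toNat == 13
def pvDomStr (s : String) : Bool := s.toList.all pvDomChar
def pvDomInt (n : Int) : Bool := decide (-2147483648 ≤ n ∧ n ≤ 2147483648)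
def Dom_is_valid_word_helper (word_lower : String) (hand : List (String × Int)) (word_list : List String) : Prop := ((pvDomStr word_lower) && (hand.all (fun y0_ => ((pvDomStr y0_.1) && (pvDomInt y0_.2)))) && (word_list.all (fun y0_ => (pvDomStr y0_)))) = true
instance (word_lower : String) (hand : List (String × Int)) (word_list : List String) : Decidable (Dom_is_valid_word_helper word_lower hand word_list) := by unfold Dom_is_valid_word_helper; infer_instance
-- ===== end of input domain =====

-- B replaces A's build-frequency-dict-then-compare two-pass check and hand-written
-- search loop with a single consuming pass over the word against a copy of the hand,
-- plus a direct membership test (objective: simpler).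

-- ===== PORT A =====
-- the 'for key, value in word_lower_dict.items()' loop with its early 'return False'
def pvCheckKeys : List (String × Int) → PySem.Dict String Int → Bool
  | [], _ => true
  | (k, v) :: rest, hd =>
      match hd.get? k with
      | none => false                                   -- key not in hand
      | some hv => if hv < v then false else pvCheckKeys rest hd

-- the 'found' loop over word_list
def pvFound : List String → String → Bool
  | [], _ => false
  | w :: rest, wl => if w == wl then true else pvFound rest wl

def is_valid_word_helper (word_lower : String) (hand : List (String × Int)) (word_list : List String) : Bool :=
  -- get_frequency_dict(word_lower): iterating a Python str yields 1-char strings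
  let word_lower_dict : PySem.Dict String Int :=
    (word_lower.toList.map Char.toString).foldl
      (fun d x => d.insert x (d.getD x 0 + 1)) PySem.Dict.empty
  if pvCheckKeys word_lower_dict.items (PySem.Dict.mk hand) then
    pvFound word_list word_lower
  else false

-- ===== PORT B =====
-- B's consuming loop: fail when the remaining count is ≤ 0, else decrement
def pvConsume : List Char → PySem.Dict String Int → Bool
  | [], _ => true
  | c :: rest, rem =>
      if rem.getD c.toString 0 ≤ 0 then false
      else pvConsume rest (rem.insert c.toString (rem.getD c.toString 0 - 1))

def is_valid_word_helper_alt (word_lower : String) (hand : List (String × Int)) (word_list : List String) : Bool :=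
  if pvConsume word_lower.toList (PySem.Dict.mk hand) then
    word_list.contains word_lower
  else false

-- ===== PRECONDITION & SPEC =====
def Spec_is_valid_word_helper (word_lower : String) (hand : List (String × Int)) (word_list : List String) (out : Bool) : Prop := out = is_valid_word_helper_alt word_lower hand word_list
instance (word_lower : String) (hand : List (String × Int)) (word_list : List String) (out : Bool) : Decidable (Spec_is_valid_word_helper word_lower hand word_list out) := by unfold Spec_is_valid_word_helper; infer_instance

-- ===== CLAIM (what is proved, stated in full; the proofs are below) =====
def Claim_equal_is_valid_word_helper : Prop := ∀ (word_lower : String) (hand : List (String × Int)) (word_list : List String), Dom_is_valid_word_helper word_lower hand word_list → Spec_is_valid_word_helper word_lower hand word_list (is_valid_word_helper word_lower hand word_list)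

-- ===== LEMMAS AND PROOFS =====

theorem pvFound_eq_contains (ws : List String) (wl : String) :
    pvFound ws wl = ws.contains wl := by
  induction ws with
  | nil => rfl
  | cons w rest ih =>
      by_cases h : w = wl
      · subst h; simp [pvFound]
      · have h1 : (w == wl) = false := by simpa using h
        simp only [pvFound, h1, Bool.false_eq_true, if_false, ih,
          List.elem_eq_mem]
        rw [decide_eq_decide]
        constructor
        · exact List.mem_cons_of_mem _
        · intro hm
          rcases List.mem_cons.mp hm with e | hm2
          · exact absurd e.symm h
          · exact hm2

theorem pvCheckKeys_char (ks L : List String) (hd : PySem.Dict String Int)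
    (hsub : ∀ k ∈ ks, k ∈ L) :
    pvCheckKeys (ks.map (fun k => (k, (L.count k : Int)))) hd
      = decide (∀ k ∈ ks, (L.count k : Int) ≤ hd.getD k 0) := by
  induction ks with
  | nil => simp [pvCheckKeys]
  | cons k ks ih =>
      have hkL : k ∈ L := hsub k (List.mem_cons_self ..)
      have hcpos : (0 : Int) < (L.count k : Int) := by
        exact_mod_cast List.count_pos_iff.mpr hkL
      simp only [List.map_cons, pvCheckKeys]
      cases hg : hd.get? k with
      | none =>
          have hgd : hd.getD k 0 = 0 := PySem.Dict.getD_of_get?_eq_none hd 0 hg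
          have hno : ¬ ((L.count k : Int) ≤ hd.getD k 0) := by omega
          simp [hno]
      | some hv =>
          have hgd : hd.getD k 0 = hv := PySem.Dict.getD_of_get?_eq_some hd 0 hg
          by_cases hlt : hv < (L.count k : Int)
          · have hno : ¬ ((L.count k : Int) ≤ hd.getD k 0) := by omega
            simp [hlt, hno]
          · have h1 : (L.count k : Int) ≤ hd.getD k 0 := by omega
            have ihh := ih (fun x hx => hsub x (List.mem_cons_of_mem _ hx))
            simp [hlt, ihh, h1]

theorem pvConsume_char (l : List Char) (rem : PySem.Dict String Int) :
    pvConsume l rem = decide (∀ k ∈ l.map Char.toString, ((l.map Char.toString).count k : Int) ≤ rem.getD k 0) := by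
  induction l generalizing rem with
  | nil => simp [pvConsume]
  | cons c rest ih =>
      have hstep : pvConsume (c :: rest) rem =
          if rem.getD c.toString 0 ≤ 0 then false
          else pvConsume rest (rem.insert c.toString (rem.getD c.toString 0 - 1)) := rfl
      rw [List.map_cons, hstep]
      by_cases h0 : rem.getD c.toString 0 ≤ 0
      · rw [if_pos h0]
        have hnot : ¬ (∀ k ∈ c.toString :: rest.map Char.toString,
            (((c.toString :: rest.map Char.toString).count k : Int)) ≤ rem.getD k 0) := by
          intro hf
          have h1 := hf c.toString (List.mem_cons_self ..)
          have h2 : 0 < (c.toString :: rest.map Char.toString).count c.toString :=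
            List.count_pos_iff.mpr (List.mem_cons_self ..)
          omega
        exact (decide_eq_false hnot).symm
      · rw [if_neg h0, ih]
        rw [decide_eq_decide]
        constructor
        · intro hf k hk
          by_cases hkc : k = c.toString
          · rw [hkc, List.count_cons_self]
            by_cases hmem : c.toString ∈ rest.map Char.toString
            · have h3 := hf c.toString hmem
              rw [PySem.Dict.getD_insert, if_pos rfl] at h3
              push_cast
              omega
            · have hz : (rest.map Char.toString).count c.toString = 0 := List.count_eq_zero.mpr hmem
              rw [hz]
              push_cast
              omega
          · have hmem : k ∈ rest.map Char.toString := by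
              rcases List.mem_cons.mp hk with h | h
              · exact absurd h hkc
              · exact h
            have := hf k hmem
            rw [PySem.Dict.getD_insert, if_neg hkc] at this
            rw [List.count_cons_of_ne (fun e => hkc e.symm)]
            exact this
        · intro hf k hk
          rw [PySem.Dict.getD_insert]
          by_cases hkc : k = c.toString
          · rw [hkc, if_pos rfl]
            have h3 := hf c.toString (List.mem_cons_self ..)
            rw [List.count_cons_self] at h3
            push_cast at h3 ⊢
            omega
          · have := hf k (List.mem_cons_of_mem _ hk)
            rw [List.count_cons_of_ne (fun e => hkc e.symm)] at this
            rw [if_neg hkc]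
            exact this

theorem pvCheck_eq_pvConsume (l : List Char) (hd : PySem.Dict String Int) :
    pvCheckKeys ((l.map Char.toString).foldl
        (fun d x => d.insert x (d.getD x 0 + 1)) PySem.Dict.empty).items hd
      = pvConsume l hd := by
  rw [PySem.Dict.foldl_insert_getD_add_one_eq_counter, PySem.Dict.items_counter,
    pvCheckKeys_char _ _ _ (fun k hk => (PySem.Set.mem_ofList _ _).mp hk),
    pvConsume_char]
  rw [decide_eq_decide]
  constructor
  · intro h k hk; exact h k ((PySem.Set.mem_ofList _ _).mpr hk)
  · intro h k hk; exact h k ((PySem.Set.mem_ofList _ _).mp hk)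

-- ===== VERDICT (by name: the statement is the Claim_ definition above) =====
theorem is_valid_word_helper_spec : Claim_equal_is_valid_word_helper := by
  intro wl hand ws _
  unfold Spec_is_valid_word_helper is_valid_word_helper is_valid_word_helper_alt
  simp only [pvCheck_eq_pvConsume, pvFound_eq_contains]
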